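-- pv_equiv track=rewrite | github.com/JJOL/TEB-LAB-UPC-2026 | Lab6/ex7_1.wfa.py | cigar_to_path
-- ===== SOURCE A (Python) =====
-- from typing import Dict, List, Optional, Tuple
--
-- def cigar_to_path(cigar: str) -> List[Tuple[int, int]]:
--   path = []
--   i = 0
--   j = 0
--   path.append((i, j))
--
--   for op in cigar:
--     if op == "M" or op == "X":
--       i += 1
--       j += 1
--     elif op == "D":
--       i += 1
--     elif op == "I":
--       j += 1
--     path.append((i, j))
--
--   return path
-- ===== SOURCE B (Python) =====
-- from itertools import accumulate
--
-- def cigar_to_path(cigar):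
--     xs = list(accumulate((1 if c in "MXD" else 0 for c in cigar), initial=0))
--     ys = list(accumulate((1 if c in "MXI" else 0 for c in cigar), initial=0))
--     return list(zip(xs, ys))
-- ===== Notes on version B (the rewrite author's own statement) =====
-- stated objective: alternative
-- what changed: Decouples the two coordinates: each coordinate is computed independently as the running prefix count of its own op-set ('MXD' for i, 'MXI' for j) via itertools.accumulate, and the path is the zip of the two scalar prefix-count sequences, instead of A's single loop mutating a pair of counters with a branch chain.
import Mathlib
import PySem

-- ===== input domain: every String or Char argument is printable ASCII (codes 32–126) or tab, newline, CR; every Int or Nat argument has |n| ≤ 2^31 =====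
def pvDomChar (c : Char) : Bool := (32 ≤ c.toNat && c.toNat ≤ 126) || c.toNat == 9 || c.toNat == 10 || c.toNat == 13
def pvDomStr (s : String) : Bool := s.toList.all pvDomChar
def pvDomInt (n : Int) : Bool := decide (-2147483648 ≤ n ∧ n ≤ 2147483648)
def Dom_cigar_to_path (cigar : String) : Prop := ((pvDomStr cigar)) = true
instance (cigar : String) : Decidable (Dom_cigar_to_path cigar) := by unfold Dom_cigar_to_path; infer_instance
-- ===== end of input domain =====

-- B computes each coordinate independently as a prefix count of its own op-set and zips
-- the two sequences, replacing A's single loop mutating a pair of counters (alternative decomposition).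

-- ===== PORT A =====
-- A: mutable i, j and a growing path list; each char branches and appends the updated point.
def cigar_to_path (cigar : String) : List (Int × Int) :=
  let st := cigar.toList.foldl
    (fun (st : Int × Int × List (Int × Int)) op =>
      let i := st.1; let j := st.2.1; let path := st.2.2
      let ij : Int × Int :=
        if op = 'M' ∨ op = 'X' then (i + 1, j + 1)
        else if op = 'D' then (i + 1, j)
        else if op = 'I' then (i, j + 1)
        else (i, j)
      (ij.1, ij.2, path ++ [ij]))
    (0, 0, [(0, 0)])
  st.2.2

-- ===== PORT B =====
-- accumulate(gen, initial=0) over '1 if c in "MXD" else 0' = scanl of adding the indicator.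
def cigar_to_path_alt (cigar : String) : List (Int × Int) :=
  let xs := cigar.toList.scanl (fun a c => a + (if c ∈ ['M','X','D'] then (1 : Int) else 0)) 0
  let ys := cigar.toList.scanl (fun a c => a + (if c ∈ ['M','X','I'] then (1 : Int) else 0)) 0
  xs.zip ys

-- ===== PRECONDITION & SPEC =====
def Spec_cigar_to_path (cigar : String) (out : List (Int × Int)) : Prop := out = cigar_to_path_alt cigar
instance (cigar : String) (out : List (Int × Int)) : Decidable (Spec_cigar_to_path cigar out) := by unfold Spec_cigar_to_path; infer_instance

-- ===== CLAIM (what is proved, stated in full; the proofs are below) =====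
def Claim_equal_cigar_to_path : Prop := ∀ (cigar : String), Dom_cigar_to_path cigar → Spec_cigar_to_path cigar (cigar_to_path cigar)

-- ===== LEMMAS AND PROOFS =====

-- zipping two scanls over the same list is one scanl over the pair
theorem pv_zip_scanl {α : Type} (f g : Int → α → Int) :
    ∀ (l : List α) (a b : Int),
    (List.scanl f a l).zip (List.scanl g b l)
      = List.scanl (fun (p : Int × Int) c => (f p.1 c, g p.2 c)) (a, b) l := by
  intro l
  induction l with
  | nil => intro a b; simp [List.scanl]
  | cons c l ih => intro a b; simp only [List.scanl_cons, List.zip_cons_cons, ih]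

theorem pv_scanl_head {α β : Type} (f : α → β → α) (b : α) (l : List β) :
    b :: (List.scanl f b l).tail = List.scanl f b l := by
  cases l <;> simp [List.scanl]

-- A's fold equals the paired scanl
theorem pv_fold_scan (l : List Char) : ∀ (i j : Int) (path : List (Int × Int)),
    (l.foldl
      (fun (st : Int × Int × List (Int × Int)) op =>
        let i := st.1; let j := st.2.1; let path := st.2.2
        let ij : Int × Int :=
          if op = 'M' ∨ op = 'X' then (i + 1, j + 1)
          else if op = 'D' then (i + 1, j)
          else if op = 'I' then (i, j + 1)
          else (i, j)
        (ij.1, ij.2, path ++ [ij]))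
      (i, j, path)).2.2
    = path ++ (List.scanl (fun (p : Int × Int) c =>
        (p.1 + (if c ∈ ['M','X','D'] then (1 : Int) else 0),
         p.2 + (if c ∈ ['M','X','I'] then (1 : Int) else 0))) (i, j) l).tail := by
  induction l with
  | nil => intro i j path; simp
  | cons op l ih =>
    intro i j path
    simp only [List.foldl_cons, List.scanl_cons, List.tail_cons]
    have hd : ((i, j).1 + (if op ∈ ['M','X','D'] then (1 : Int) else 0),
               (i, j).2 + (if op ∈ ['M','X','I'] then (1 : Int) else 0))
        = (if op = 'M' ∨ op = 'X' then ((i : Int) + 1, (j : Int) + 1)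
           else if op = 'D' then (i + 1, j)
           else if op = 'I' then (i, j + 1)
           else (i, j)) := by
      simp only [List.mem_cons, List.not_mem_nil, or_false]
      split_ifs <;> simp_all
    rw [← hd]
    simp only []
    rw [ih]
    rw [← pv_scanl_head (fun (p : Int × Int) c =>
        (p.1 + (if c ∈ ['M','X','D'] then (1 : Int) else 0),
         p.2 + (if c ∈ ['M','X','I'] then (1 : Int) else 0)))
        (i + (if op ∈ ['M','X','D'] then (1 : Int) else 0),
         j + (if op ∈ ['M','X','I'] then (1 : Int) else 0)) l]
    simp [List.append_assoc]

-- ===== VERDICT (by name: the statement is the Claim_ definition above) =====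
theorem cigar_to_path_spec : Claim_equal_cigar_to_path := by
  intro cigar _
  unfold Spec_cigar_to_path cigar_to_path cigar_to_path_alt
  rw [pv_fold_scan, pv_zip_scanl]
  rw [← pv_scanl_head (fun (p : Int × Int) c =>
      (p.1 + (if c ∈ ['M','X','D'] then (1 : Int) else 0),
       p.2 + (if c ∈ ['M','X','I'] then (1 : Int) else 0))) (0, 0) cigar.toList]
  simp
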